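-- pv_equiv track=rewrite | github.com/abhishek25dh/exp-pipeline | layout_13_step_1.py | build_max_lens
-- ===== SOURCE A (Python) =====
-- import math
--
-- def build_max_lens(total_tokens, min_lens):
--     n = len(min_lens)
--     avg = int(math.ceil(total_tokens / max(n, 1)))
--     base_img = max(7, avg + 3)
--     base_lbl = 4
--     max_lens = [(base_img if i % 2 == 0 else base_lbl) for i in range(n)]
--     for i in range(n):
--         if max_lens[i] < min_lens[i]:
--             max_lens[i] = min_lens[i]
--
--     # Grow image phrases first to keep labels compact.
--     img_idxs = [i for i in range(n) if i % 2 == 0]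
--     if not img_idxs:
--         img_idxs = list(range(n))
--     k = 0
--     while sum(max_lens) < total_tokens:
--         idx = img_idxs[k % len(img_idxs)]
--         max_lens[idx] += 1
--         k += 1
--     return max_lens
-- ===== SOURCE B (Python) =====
-- def build_max_lens(total_tokens, min_lens):
--     n = len(min_lens)
--     avg = -(-total_tokens // max(n, 1))  # exact integer ceiling division
--     base_img = max(7, avg + 3)
--     lens = [max(base_img if i % 2 == 0 else 4, mn) for i, mn in enumerate(min_lens)]
--     deficit = total_tokens - sum(lens)
--     if deficit <= 0:
--         return lens
--     m = (n + 1) // 2  # number of even (image) slots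
--     q, r = divmod(deficit, m)
--     return [x + (q + (1 if i // 2 < r else 0)) if i % 2 == 0 else x
--             for i, x in enumerate(lens)]
-- ===== Notes on version B (the rewrite author's own statement) =====
-- stated objective: alternative
-- what changed: The unit-increment round-robin while loop (one iteration per remaining token, recomputing sum each time) is replaced by a single divmod: each even slot gets deficit//m extra tokens and the first deficit%m even slots one more, built in one comprehension.
import Mathlib
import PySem

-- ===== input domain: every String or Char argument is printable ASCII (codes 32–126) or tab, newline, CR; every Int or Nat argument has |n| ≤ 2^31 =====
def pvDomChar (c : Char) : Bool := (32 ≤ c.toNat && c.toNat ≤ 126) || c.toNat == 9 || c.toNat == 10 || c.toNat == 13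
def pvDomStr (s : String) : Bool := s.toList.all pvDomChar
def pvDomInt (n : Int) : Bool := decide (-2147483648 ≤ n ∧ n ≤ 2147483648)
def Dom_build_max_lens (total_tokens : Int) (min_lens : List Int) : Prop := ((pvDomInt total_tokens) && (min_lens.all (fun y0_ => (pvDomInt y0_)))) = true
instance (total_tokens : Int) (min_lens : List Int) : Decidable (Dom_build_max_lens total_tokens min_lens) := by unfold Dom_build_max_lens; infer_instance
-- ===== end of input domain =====

-- B replaces A's one-token-at-a-time round-robin while loop by a single divmod distribution built in one pass.

-- ===== PORT A =====
-- the while loop: while sum(max_lens) < total: bump max_lens[img_idxs[k % len]] by 1; k += 1.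
-- Guarded by fuel = (total - sum).toNat, which is exactly the number of iterations the
-- Python loop performs (each iteration raises the sum by 1); the sum test is kept verbatim.
def pvGrowA (total : Int) (img : List Nat) : Nat → Nat → List Int → List Int
  | 0, _, ml => ml
  | fuel+1, k, ml =>
    if ml.sum < total then
      let idx := img.getD (k % img.length) 0
      pvGrowA total img fuel (k+1) (ml.set idx (ml.getD idx 0 + 1))
    else ml

-- math.ceil(total_tokens / max(n, 1)) is ported as the exact integer ceiling division
-- -((-t) // d); exact on Dom (|total_tokens| ≤ 2^31, so the float quotient's rounding
-- error < 2^-21 cannot move the value across an integer for any feasible list length).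
def build_max_lens (total_tokens : Int) (min_lens : List Int) : List Int :=
  let n := min_lens.length
  let avg := -(PySem.Int.floordiv (-total_tokens) (max (n : Int) 1))
  let base_img := max 7 (avg + 3)
  let max_lens0 := (List.range n).map (fun i => if i % 2 = 0 then base_img else (4 : Int))
  let max_lens := (List.range n).foldl
    (fun ml i => if ml.getD i 0 < min_lens.getD i 0 then ml.set i (min_lens.getD i 0) else ml)
    max_lens0
  let img_idxs := (List.range n).filter (fun i => i % 2 = 0)
  let img_idxs := if img_idxs.isEmpty then List.range n else img_idxs
  pvGrowA total_tokens img_idxs (total_tokens - max_lens.sum).toNat 0 max_lens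

-- ===== PORT B =====
def build_max_lens_alt (total_tokens : Int) (min_lens : List Int) : List Int :=
  let n := min_lens.length
  let avg := -(PySem.Int.floordiv (-total_tokens) (max (n : Int) 1))
  let base_img := max 7 (avg + 3)
  let lens := min_lens.mapIdx (fun i mn => max (if i % 2 = 0 then base_img else 4) mn)
  let deficit := total_tokens - lens.sum
  if deficit ≤ 0 then lens
  else
    let m := (n + 1) / 2
    let q := PySem.Int.floordiv deficit (m : Int)
    let r := PySem.Int.mod deficit (m : Int)
    lens.mapIdx (fun i x => if i % 2 = 0 then x + (q + if ((i / 2 : Nat) : Int) < r then 1 else 0) else x)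

-- ===== PRECONDITION & SPEC =====
-- Pre_ excludes only the inputs where the Python A raises ZeroDivisionError
-- (empty min_lens with a positive total_tokens: 'k % len(img_idxs)' with len 0).
def Pre_build_max_lens (total_tokens : Int) (min_lens : List Int) : Prop :=
  min_lens ≠ [] ∨ total_tokens ≤ 0
instance (total_tokens : Int) (min_lens : List Int) : Decidable (Pre_build_max_lens total_tokens min_lens) := by unfold Pre_build_max_lens; infer_instance
def pvWitness_build_max_lens : Int × List Int := (40, [1, 2, 3])

def Spec_build_max_lens (total_tokens : Int) (min_lens : List Int) (out : List Int) : Prop := out = build_max_lens_alt total_tokens min_lens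
instance (total_tokens : Int) (min_lens : List Int) (out : List Int) : Decidable (Spec_build_max_lens total_tokens min_lens out) := by unfold Spec_build_max_lens; infer_instance

-- ===== CLAIM (what is proved, stated in full; the proofs are below) =====
def Claim_equal_build_max_lens : Prop := ∀ (total_tokens : Int) (min_lens : List Int), Dom_build_max_lens total_tokens min_lens → Pre_build_max_lens total_tokens min_lens → Spec_build_max_lens total_tokens min_lens (build_max_lens total_tokens min_lens)

-- ===== LEMMAS AND PROOFS =====

-- pointwise additive update: ml with f j added to slot j
def pvUpd (f : Nat → Int) (ml : List Int) : List Int := ml.mapIdx (fun j x => x + f j)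

-- the unconditional round-robin bumper (what A's loop does while sum < total holds)
def pvGrowU (img : List Nat) : Nat → Nat → List Int → List Int
  | 0, _, ml => ml
  | s+1, k, ml =>
    let idx := img.getD (k % img.length) 0
    pvGrowU img s (k+1) (ml.set idx (ml.getD idx 0 + 1))

theorem length_pvUpd (f : Nat → Int) (ml : List Int) : (pvUpd f ml).length = ml.length := by
  simp [pvUpd]

theorem getElem_pvUpd (f : Nat → Int) (ml : List Int) (j : Nat) (h : j < (pvUpd f ml).length) :
    (pvUpd f ml)[j] = ml[j]'(by simpa [pvUpd] using h) + f j := by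
  simp [pvUpd]

theorem pvUpd_pvUpd (f g : Nat → Int) (ml : List Int) :
    pvUpd f (pvUpd g ml) = pvUpd (fun j => g j + f j) ml := by
  apply List.ext_getElem <;> simp [pvUpd]

theorem pvUpd_congr (f g : Nat → Int) (ml : List Int)
    (h : ∀ j, j < ml.length → f j = g j) :
    pvUpd f ml = pvUpd g ml := by
  apply List.ext_getElem
  · simp [pvUpd]
  · intro j h1 h2
    simp only [pvUpd, List.getElem_mapIdx]
    rw [h j (by simpa [pvUpd] using h1)]

theorem pvUpd_zero (ml : List Int) : pvUpd (fun _ => 0) ml = ml := by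
  apply List.ext_getElem <;> simp [pvUpd]

theorem pvSum_set_add_one (ml : List Int) (i : Nat) (h : i < ml.length) :
    (ml.set i (ml.getD i 0 + 1)).sum = ml.sum + 1 := by
  induction ml generalizing i with
  | nil => simp at h
  | cons x xs ih =>
    cases i with
    | zero => simp [List.set]; ring
    | succ i =>
      simp only [List.set, List.sum_cons, List.getD_cons_succ]
      rw [ih i (by simpa using h)]
      ring

theorem pvSet_eq_pvUpd (ml : List Int) (i : Nat) (h : i < ml.length) :
    ml.set i (ml.getD i 0 + 1) = pvUpd (fun j => if j = i then 1 else 0) ml := by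
  apply List.ext_getElem
  · simp [pvUpd]
  · intro j h1 h2
    simp only [pvUpd, List.getElem_mapIdx, List.getElem_set]
    by_cases hj : j = i
    · subst hj; simp [List.getD_eq_getElem?_getD, List.getElem?_eq_getElem h]
    · simp [hj, Ne.symm hj]

-- A's fueled loop does exactly (total - sum).toNat unconditional bumps
theorem growA_eq_growU (total : Int) (img : List Nat) (himg : img ≠ []) :
    ∀ (fuel : Nat) (k : Nat) (ml : List Int), (∀ i ∈ img, i < ml.length) →
      (ml.sum + fuel ≤ total) →
      pvGrowA total img fuel k ml = pvGrowU img fuel k ml := by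
  intro fuel
  induction fuel with
  | zero => intro k ml _ _; rfl
  | succ f ih =>
    intro k ml hin hsum
    have hlen : 0 < img.length := List.length_pos_of_ne_nil himg
    have hidx : img.getD (k % img.length) 0 ∈ img := by
      have : k % img.length < img.length := Nat.mod_lt _ hlen
      rw [List.getD_eq_getElem?_getD, List.getElem?_eq_getElem this]
      exact List.getElem_mem _
    have hidxlt := hin _ hidx
    have hs : ml.sum < total := by omega
    simp only [pvGrowA, pvGrowU, if_pos hs]
    apply ih
    · intro i hi; rw [List.length_set]; exact hin i hi
    · rw [pvSum_set_add_one _ _ hidxlt]; push_cast at hsum; omega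

theorem growU_append (img : List Nat) (a b k : Nat) (ml : List Int) :
    pvGrowU img (a + b) k ml = pvGrowU img b (k + a) (pvGrowU img a k ml) := by
  induction a generalizing k ml with
  | zero => simp [pvGrowU]
  | succ a ih =>
    rw [Nat.succ_add]
    simp only [pvGrowU]
    rw [ih]
    ring_nf

theorem growU_rotate (img : List Nat) :
    ∀ (s k k' : Nat) (ml : List Int), k % img.length = k' % img.length →
      pvGrowU img s k ml = pvGrowU img s k' ml := by
  intro s
  induction s with
  | zero => intro k k' ml _; rfl
  | succ s ih =>
    intro k k' ml h
    simp only [pvGrowU, h]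
    apply ih
    rw [Nat.add_mod k 1, Nat.add_mod k' 1, h]

-- the even image slots of a list of length n
theorem evens_eq (n : Nat) :
    (List.range n).filter (fun i => i % 2 = 0) = (List.range ((n + 1) / 2)).map (fun j => 2 * j) := by
  induction n with
  | zero => rfl
  | succ n ih =>
    rw [List.range_succ, List.filter_append]
    by_cases h : n % 2 = 0
    · have h2 : (n + 2) / 2 = (n + 1) / 2 + 1 := by omega
      rw [h2, List.range_succ, List.map_append]
      simp only [ih]
      simp [h]
      omega
    · have h2 : (n + 2) / 2 = (n + 1) / 2 := by omega
      rw [h2]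
      simp only [ih]
      simp [h]

theorem length_evens (n : Nat) :
    ((List.range n).filter (fun i => i % 2 = 0)).length = (n + 1) / 2 := by
  rw [evens_eq]; simp

theorem getD_evens (n k : Nat) (hk : k < (n + 1) / 2) :
    ((List.range n).filter (fun i => i % 2 = 0)).getD k 0 = 2 * k := by
  rw [evens_eq, List.getD_eq_getElem?_getD, List.getElem?_map, List.getElem?_range hk]
  rfl

theorem growU_partial (n : Nat) :
    ∀ (s k : Nat) (ml : List Int), ml.length = n → k + s ≤ (n + 1) / 2 →
      pvGrowU ((List.range n).filter (fun i => i % 2 = 0)) s k ml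
        = pvUpd (fun j => if j % 2 = 0 ∧ k ≤ j / 2 ∧ j / 2 < k + s then 1 else 0) ml := by
  intro s
  induction s with
  | zero =>
    intro k ml hlen hk
    show ml = _
    rw [pvUpd_congr _ (fun _ => 0) ml (by intro j hj; show _ = (0 : Int); split_ifs <;> omega),
      pvUpd_zero]
  | succ s ih =>
    intro k ml hlen hk
    have hk' : k < (n + 1) / 2 := by omega
    have hkm : k % ((List.range n).filter (fun i => i % 2 = 0)).length = k := by
      rw [length_evens]; exact Nat.mod_eq_of_lt hk'
    have h2k : 2 * k < n := by omega
    simp only [pvGrowU, hkm, getD_evens n k hk']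
    rw [pvSet_eq_pvUpd _ _ (by rw [hlen]; exact h2k)]
    rw [ih (k + 1) _ (by simp [length_pvUpd, hlen]) (by omega)]
    rw [pvUpd_pvUpd]
    apply pvUpd_congr
    intro j hj
    split_ifs <;> omega

theorem growU_main (n : Nat) (hn : 1 ≤ n) :
    ∀ (D : Nat) (ml : List Int), ml.length = n →
      pvGrowU ((List.range n).filter (fun i => i % 2 = 0)) D 0 ml
        = pvUpd (fun j => if j % 2 = 0
            then ((D / ((n + 1) / 2) : Nat) : Int) + (if j / 2 < D % ((n + 1) / 2) then 1 else 0)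
            else 0) ml := by
  intro D
  induction D using Nat.strong_induction_on with
  | _ D ih =>
    intro ml hlen
    have hm1 : 1 ≤ (n + 1) / 2 := by omega
    by_cases hD : D < (n + 1) / 2
    · rw [growU_partial n D 0 ml hlen (by omega)]
      apply pvUpd_congr
      intro j hj
      have h1 : D / ((n + 1) / 2) = 0 := Nat.div_eq_of_lt hD
      have h2 : D % ((n + 1) / 2) = D := Nat.mod_eq_of_lt hD
      rw [h1, h2]
      split_ifs <;> simp <;> omega
    · obtain ⟨e, rfl⟩ : ∃ e, D = (n + 1) / 2 + e := ⟨D - (n + 1) / 2, by omega⟩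
      rw [growU_append]
      rw [growU_partial n ((n + 1) / 2) 0 ml hlen (by omega)]
      rw [growU_rotate _ e (0 + (n + 1) / 2) 0 _ (by rw [length_evens]; simp)]
      rw [ih e (by omega) _ (by simp [length_pvUpd, hlen])]
      rw [pvUpd_pvUpd]
      apply pvUpd_congr
      intro j hj
      have h1 : ((n + 1) / 2 + e) / ((n + 1) / 2) = e / ((n + 1) / 2) + 1 := by
        rw [Nat.add_comm]; exact Nat.add_div_right e hm1
      have h2 : ((n + 1) / 2 + e) % ((n + 1) / 2) = e % ((n + 1) / 2) := by
        rw [Nat.add_comm]; exact Nat.add_mod_right e ((n + 1) / 2)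
      rw [h1, h2]
      split_ifs <;> push_cast <;> omega

-- A's index-by-index max loop is an elementwise max
theorem foldl_minmax (v : List Int) (base : List Int) (hb : base.length = v.length) :
    ∀ j, j ≤ v.length →
      (List.range j).foldl
        (fun ml i => if ml.getD i 0 < v.getD i 0 then ml.set i (v.getD i 0) else ml) base
      = base.mapIdx (fun i x => if i < j then max x (v.getD i 0) else x) := by
  intro j
  induction j with
  | zero =>
    intro _
    apply List.ext_getElem <;> simp
  | succ j ih =>
    intro hj
    rw [List.range_succ, List.foldl_append, ih (by omega), List.foldl_cons, List.foldl_nil]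
    have hjb : j < base.length := by omega
    have hTget : (base.mapIdx (fun i x => if i < j then max x (v.getD i 0) else x)).getD j 0
        = base[j] := by
      rw [List.getD_eq_getElem?_getD, List.getElem?_eq_getElem (by simpa using hjb)]
      simp [List.getElem_mapIdx]
    rw [hTget]
    by_cases hc : base[j] < v.getD j 0
    · rw [if_pos hc]
      apply List.ext_getElem
      · simp
      · intro i hi1 hi2
        have hib : i < base.length := by simpa using hi2
        rw [List.getElem_set]
        simp only [List.getElem_mapIdx]
        by_cases hij : j = i
        · subst hij
          rw [if_pos rfl, if_pos (by omega)]
          omega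
        · rw [if_neg hij]
          have hij' : i ≠ j := fun h => hij h.symm
          split_ifs <;> omega
    · rw [if_neg hc]
      apply List.ext_getElem
      · simp
      · intro i hi1 hi2
        simp only [List.getElem_mapIdx]
        by_cases hij : i = j
        · subst hij; split_ifs <;> omega
        · split_ifs <;> omega

theorem baseA_eq_lens (min_lens : List Int) (bimg : Int) :
    (List.range min_lens.length).foldl
      (fun ml i => if ml.getD i 0 < min_lens.getD i 0 then ml.set i (min_lens.getD i 0) else ml)
      ((List.range min_lens.length).map (fun i => if i % 2 = 0 then bimg else (4 : Int)))
    = min_lens.mapIdx (fun i mn => max (if i % 2 = 0 then bimg else 4) mn) := by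
  rw [foldl_minmax min_lens _ (by simp) min_lens.length le_rfl]
  apply List.ext_getElem
  · simp
  · intro i hi1 hi2
    have hib : i < min_lens.length := by simpa using hi2
    simp only [List.getElem_mapIdx, List.getElem_map, List.getElem_range]
    rw [if_pos hib, List.getD_eq_getElem?_getD, List.getElem?_eq_getElem hib]
    rfl

-- ===== VERDICT (by name: the statement is the Claim_ definition above) =====
theorem build_max_lens_spec : Claim_equal_build_max_lens := by
  intro total min_lens _ hpre
  show build_max_lens total min_lens = build_max_lens_alt total min_lens
  unfold build_max_lens build_max_lens_alt
  simp only [baseA_eq_lens]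
  set n := min_lens.length with hn
  set bimg := max 7 (-(PySem.Int.floordiv (-total) (max (n : Int) 1)) + 3) with hbimg
  set L := min_lens.mapIdx (fun i mn => max (if i % 2 = 0 then bimg else 4) mn) with hL
  have hLlen : L.length = n := by rw [hL, List.length_mapIdx]
  by_cases hD : total - L.sum ≤ 0
  · rw [if_pos hD, Int.toNat_of_nonpos hD]
    rfl
  · have hD' : 0 < total - L.sum := by omega
    rw [if_neg hD]
    have hne : min_lens ≠ [] := by
      rcases hpre with h | h
      · exact h
      · intro hnil
        rw [hnil] at hL
        simp [hL] at hD'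
        omega
    have hn1 : 1 ≤ n := by
      rw [hn]
      exact List.length_pos_of_ne_nil hne
    have hEne : (List.range n).filter (fun i => i % 2 = 0) ≠ [] := by
      intro h
      have := length_evens n
      rw [h] at this
      simp at this
      omega
    rw [if_neg (by simp [List.isEmpty_iff, hEne])]
    have hmem : ∀ i ∈ (List.range n).filter (fun i => i % 2 = 0), i < L.length := by
      intro i hi
      rw [evens_eq] at hi
      obtain ⟨j, hj, rfl⟩ := List.mem_map.mp hi
      rw [hLlen]
      have := List.mem_range.mp hj
      omega
    have hc : (((total - L.sum).toNat : Nat) : Int) = total - L.sum := Int.toNat_of_nonneg (by omega)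
    rw [growA_eq_growU total _ hEne _ 0 L hmem (by omega)]
    rw [growU_main n hn1 _ L hLlen]
    apply List.ext_getElem
    · simp [pvUpd]
    · intro i hi1 hi2
      rw [getElem_pvUpd]
      have hfd := PySem.Int.floordiv_natCast (total - L.sum).toNat ((n + 1) / 2)
      have hmd := PySem.Int.mod_natCast (total - L.sum).toNat ((n + 1) / 2)
      rw [hc] at hfd hmd
      simp only [List.getElem_mapIdx, hfd, hmd]
      split_ifs <;> omega
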